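-- pv_equiv track=rewrite | github.com/Kyle-Keith/YARA-Analyzer-Docker | script.py | clean_yara_file_v2
-- ===== SOURCE A (Python) =====
-- def clean_yara_file_v2(yara_file_content):
--     lines = yara_file_content.split('\n')
--     fields = ["meta:", "strings:", "condition:"]
--     # List to hold the cleaned file content
--     cleaned_content = []
--     item = []
--
--     # Flags to handle indentation and rule parsing
--     in_rule = False
--
--     for line in lines:
--         is_special_comment = any(keyword in line for keyword in ["STATUS:", "ORIGINAL:", "Error:"])
--
--         if line.lstrip().startswith('//') and not is_special_comment:
--             # Remove leading comment slashes for lines that are not special comments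
--             line_content = line.lstrip('//').lstrip()
--         else:
--             line_content = line
--
--         # Check for rule start or end
--         if line_content.startswith('rule'):
--             in_rule = True
--             item.append(line_content)
--         elif line_content.startswith('}') and in_rule:
--             in_rule = False
--             item.append(line_content)
--             cleaned_content.append('\n'.join(item))
--             item = []  # Reset item for the next rule
--         elif in_rule:
--             if any(field == line_content.strip() for field in fields):
--                 line_content = line_content.strip()
--                 item.append(' ' * 4 + line_content)
--             else:
--                 # Normal lines within a rule
--                 line_content = line_content.strip()
--                 item.append(' ' * 8 + line_content)
--         else:
--             # Lines outside rules are not indented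
--             cleaned_content.append(' ' * 8 + line_content)  # Directly append to cleaned_content
--
--     return cleaned_content
-- ===== SOURCE B (Python) =====
-- def clean_yara_file_v2(yara_file_content):
--     # Phase 1: apply the comment-stripping rule to every raw line up front.
--     def uncomment(line):
--         special = any(k in line for k in ("STATUS:", "ORIGINAL:", "Error:"))
--         if line.lstrip().startswith('//') and not special:
--             return line.lstrip('//').lstrip()
--         return line
--
--     def indent(line):
--         s = line.strip()
--         return (' ' * 4 if s in ("meta:", "strings:", "condition:") else ' ' * 8) + s
--
--     cleaned = [uncomment(line) for line in yara_file_content.split('\n')]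
--
--     # Phase 2: scan-ahead consumer: an outer cursor walks the cleaned lines; on a
--     # 'rule' line an inner loop consumes the whole block up to its closing '}'.
--     out = []
--     i, n = 0, len(cleaned)
--     while i < n:
--         lc = cleaned[i]
--         i += 1
--         if lc.startswith('rule'):
--             block = [lc]
--             closed = False
--             while i < n:
--                 lc = cleaned[i]
--                 i += 1
--                 if lc.startswith('rule'):
--                     block.append(lc)
--                 elif lc.startswith('}'):
--                     out.append('\n'.join(block + [lc]))
--                     closed = True
--                     break
--                 else:
--                     block.append(indent(lc))
--             if not closed:
--                 break  # unterminated rule at EOF: the open block is dropped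
--         else:
--             out.append(' ' * 8 + lc)
--     return out
-- ===== Notes on version B (the rewrite author's own statement) =====
-- stated objective: alternative
-- what changed: A fuses comment-stripping and grouping into one loop over three mutable variables (output, current item, in-rule flag) that classifies every line against the flag; B first maps all lines through the comment-stripper, then walks the cleaned list with a cursor whose scan-ahead inner loop consumes an entire rule block up to its closing brace (dropping an unterminated block at EOF), so no in-rule flag exists.
import Mathlib
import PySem

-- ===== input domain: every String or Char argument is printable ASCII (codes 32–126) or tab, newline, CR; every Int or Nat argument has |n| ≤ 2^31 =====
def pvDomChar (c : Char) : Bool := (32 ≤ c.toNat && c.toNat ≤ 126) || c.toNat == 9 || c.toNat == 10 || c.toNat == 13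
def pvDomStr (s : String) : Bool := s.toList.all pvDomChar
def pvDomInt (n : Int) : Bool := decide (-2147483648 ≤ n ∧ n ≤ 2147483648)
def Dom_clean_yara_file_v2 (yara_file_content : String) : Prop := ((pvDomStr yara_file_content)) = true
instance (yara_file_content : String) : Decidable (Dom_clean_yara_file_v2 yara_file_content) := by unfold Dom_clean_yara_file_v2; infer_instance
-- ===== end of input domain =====

-- B replaces A's single loop over an in_rule flag by a clean-lines map followed by a
-- scan-ahead consumer (inner loop eats a whole rule block): alternative decomposition, same cost.

-- ===== PORT A =====
-- comment-stripping rule (identical code in both Pythons; in B it is the helper `uncomment`):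
-- line.lstrip('//') strips leading '/' characters; ported by hand as dropWhile (exact).
def pvCleanLine (line : String) : String :=
  let is_special_comment :=
    PySem.Str.isIn "STATUS:" line || PySem.Str.isIn "ORIGINAL:" line || PySem.Str.isIn "Error:" line
  if PySem.Str.startswith (PySem.Str.lstrip line) "//" && !is_special_comment then
    PySem.Str.lstrip (String.ofList (line.toList.dropWhile (· == '/')))
  else line
def pvFields : List String := ["meta:", "strings:", "condition:"]
def pvStepA : List String × List String × Bool → String → List String × List String × Bool
  | (cleaned_content, item, in_rule), line =>
    let line_content := pvCleanLine line
    if PySem.Str.startswith line_content "rule" then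
      (cleaned_content, item ++ [line_content], true)
    else if PySem.Str.startswith line_content "}" && in_rule then
      (cleaned_content ++ [PySem.Str.join "\n" (item ++ [line_content])], [], false)
    else if in_rule then
      if pvFields.any (fun field => field == PySem.Str.strip line_content) then
        (cleaned_content, item ++ ["    " ++ PySem.Str.strip line_content], in_rule)
      else
        (cleaned_content, item ++ ["        " ++ PySem.Str.strip line_content], in_rule)
    else
      (cleaned_content ++ ["        " ++ line_content], item, in_rule)

-- yara_file_content.split('\n'): exact via PySem.Chars.splitOn (nonempty separator)
def pvLines (s : String) : List String :=
  (PySem.Chars.splitOn s.toList ['\n']).map String.ofList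

def clean_yara_file_v2 (yara_file_content : String) : List String :=
  ((pvLines yara_file_content).foldl pvStepA ([], [], false)).1

-- ===== PORT B =====
def pvIndent (line : String) : String :=
  let s := PySem.Str.strip line
  (if s == "meta:" || s == "strings:" || s == "condition:" then "    " else "        ") ++ s

-- B's outer cursor loop (pvEmit) and its block-consuming inner loop (pvBlock)
mutual
def pvEmit : List String → List String
  | [] => []
  | lc :: rest =>
    if PySem.Str.startswith lc "rule" then pvBlock [lc] rest
    else ("        " ++ lc) :: pvEmit rest
def pvBlock : List String → List String → List String
  | _, [] => []           -- unterminated rule at EOF: the open block is dropped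
  | acc, lc :: rest =>
    if PySem.Str.startswith lc "rule" then pvBlock (acc ++ [lc]) rest
    else if PySem.Str.startswith lc "}" then PySem.Str.join "\n" (acc ++ [lc]) :: pvEmit rest
    else pvBlock (acc ++ [pvIndent lc]) rest
end

def clean_yara_file_v2_alt (yara_file_content : String) : List String :=
  pvEmit ((pvLines yara_file_content).map pvCleanLine)

-- ===== PRECONDITION & SPEC =====
def Spec_clean_yara_file_v2 (yara_file_content : String) (out : List String) : Prop := out = clean_yara_file_v2_alt yara_file_content
instance (yara_file_content : String) (out : List String) : Decidable (Spec_clean_yara_file_v2 yara_file_content out) := by unfold Spec_clean_yara_file_v2; infer_instance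

-- ===== CLAIM (what is proved, stated in full; the proofs are below) =====
def Claim_equal_clean_yara_file_v2 : Prop := ∀ (yara_file_content : String), Dom_clean_yara_file_v2 yara_file_content → Spec_clean_yara_file_v2 yara_file_content (clean_yara_file_v2 yara_file_content)

-- ===== LEMMAS AND PROOFS =====
lemma pv_fields_cond (s : String) :
    pvFields.any (fun field => field == s) = (s == "meta:" || s == "strings:" || s == "condition:") := by
  by_cases h1 : s = "meta:" <;> by_cases h2 : s = "strings:" <;> by_cases h3 : s = "condition:" <;>
    simp [pvFields, h1, h2, h3, BEq.comm, Bool.or_assoc]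

lemma a_rule (cl it : List String) (b : Bool) (l : String)
    (hr : PySem.Str.startswith (pvCleanLine l) "rule" = true) :
    pvStepA (cl, it, b) l = (cl, it ++ [pvCleanLine l], true) := by
  simp only [pvStepA]; rw [if_pos hr]

lemma a_flush (cl it : List String) (l : String)
    (hr : ¬ PySem.Str.startswith (pvCleanLine l) "rule" = true)
    (hc : PySem.Str.startswith (pvCleanLine l) "}" = true) :
    pvStepA (cl, it, true) l = (cl ++ [PySem.Str.join "\n" (it ++ [pvCleanLine l])], [], false) := by
  simp only [pvStepA]; rw [if_neg hr, if_pos (by rw [hc, Bool.true_and])]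

lemma a_in (cl it : List String) (l : String)
    (hr : ¬ PySem.Str.startswith (pvCleanLine l) "rule" = true)
    (hc : ¬ PySem.Str.startswith (pvCleanLine l) "}" = true) :
    pvStepA (cl, it, true) l = (cl, it ++ [pvIndent (pvCleanLine l)], true) := by
  simp only [pvStepA]
  rw [if_neg hr, if_neg (by simp only [Bool.and_true]; exact hc)]
  simp only [if_true]
  simp only [pvIndent, pv_fields_cond]
  split <;> rfl

lemma a_out (cl it : List String) (l : String)
    (hr : ¬ PySem.Str.startswith (pvCleanLine l) "rule" = true) :
    pvStepA (cl, it, false) l = (cl ++ ["        " ++ pvCleanLine l], it, false) := by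
  simp only [pvStepA]
  rw [if_neg hr, if_neg (by simp), if_neg (by simp)]

lemma pv_inv (ls : List String) :
    (∀ cl : List String, (ls.foldl pvStepA (cl, [], false)).1 = cl ++ pvEmit (ls.map pvCleanLine)) ∧
    (∀ cl it : List String, (ls.foldl pvStepA (cl, it, true)).1 = cl ++ pvBlock it (ls.map pvCleanLine)) := by
  induction ls with
  | nil => exact ⟨fun cl => by simp [pvEmit], fun cl it => by simp [pvBlock]⟩
  | cons l ls ih =>
    obtain ⟨ih0, ih1⟩ := ih
    constructor
    · intro cl
      simp only [List.map_cons, List.foldl_cons]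
      by_cases hr : PySem.Str.startswith (pvCleanLine l) "rule" = true
      · rw [a_rule _ _ _ _ hr, pvEmit, if_pos hr]
        exact ih1 cl [pvCleanLine l]
      · rw [a_out _ _ _ hr, pvEmit, if_neg hr, ih0, List.append_assoc]
        rfl
    · intro cl it
      simp only [List.map_cons, List.foldl_cons]
      by_cases hr : PySem.Str.startswith (pvCleanLine l) "rule" = true
      · rw [a_rule _ _ _ _ hr, pvBlock, if_pos hr]
        exact ih1 cl (it ++ [pvCleanLine l])
      · by_cases hc : PySem.Str.startswith (pvCleanLine l) "}" = true
        · rw [a_flush _ _ _ hr hc, pvBlock, if_neg hr, if_pos hc, ih0, List.append_assoc]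
          rfl
        · rw [a_in _ _ _ hr hc, pvBlock, if_neg hr, if_neg hc]
          exact ih1 cl (it ++ [pvIndent (pvCleanLine l)])

-- ===== VERDICT (by name: the statement is the Claim_ definition above) =====
theorem clean_yara_file_v2_spec : Claim_equal_clean_yara_file_v2 := by
  intro s _
  unfold Spec_clean_yara_file_v2 clean_yara_file_v2 clean_yara_file_v2_alt
  exact (pv_inv (pvLines s)).1 []
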